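-- pv_equiv track=rewrite | github.com/MarkGotham/ScoresOfScores | hum2XMLFixUp.py | characterSwaps
-- ===== SOURCE A (Python) =====
-- def characterSwaps(anyTextString):
--     '''
--     Swaps out humdrum ASCII text representations like 'a/'
--     for the corresponding character with accents ('á').
--     Removes the characers used forphrase analysis etc ({, }, |)
--     Replaces the tilde ‘~’ used for literal dashes (in cases like ‘veux-tu’)
--     with an en-dash at the end of the dashed-from word,
--     and nothing at the start of the dashed-to word.
--     '''
--
--     characterDict = {'a/':'á', 'e/':'é', 'i/':'í', 'o/':'ó', 'u/':'ú',
--                           'A/':'Á', 'E/':'É', 'I/':'Í', 'O/':'Ó', 'U/':'Ú',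
--                           'a\\':'à', 'e\\':'è', 'i\\':'ì', 'o\\':'ò', 'u\\':'ù', #Sic (backslash escaping python)
--                           'A\\':'À', 'E\\':'È', 'I\\':'Ì', 'O\\':'Ò', 'U\\':'Ù',
--                           'a^':'â', 'e^':'ê', 'i^':'î', 'o^':'ô', 'u^':'û',
--                           'A^':'A', 'E^':'Ê', 'I^':'Î', 'O^':'Ô', 'U^':'U',
--                           'a0':'å', #'e0':'', 'i0':'', 'o0':'', 'u0':'',
--                           'a1':'ā', 'e1':'ē', 'i1':'ī', 'o1':'ō', 'u1':'ū',
--                           'a2':'ä', 'e2':'ē', 'i2':'ï', 'o2':'ö', 'u2':'ü',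
--                           'c5':'ç','C5':'Ç',
--                           'c6':'č','C6':'Č',
--                      '{': '', '}': '', '|': '', '"': '', #Single characters to cut
--                      '~': '–',} # Cheat solution for literal dash in written French e.g. ‘veux-tu'
-- # https://musiccog.ohio-state.edu/Humdrum/representations/text.rep.html
--
--     output = anyTextString
--     for key in characterDict:
--         output = output.replace(key, characterDict[key])
--
--     if output:
--         if output[0] == '–':
--             output = output[1:] #Cut first character of dashed-to word
--     return(output)
-- ===== SOURCE B (Python) =====
-- def characterSwaps(anyTextString):
--     '''One left-to-right scan; the accent table is built by zipping a key string
--     with a value string instead of writing a dict literal.'''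
--     keys = ('a/ e/ i/ o/ u/ A/ E/ I/ O/ U/ '
--             'a\\ e\\ i\\ o\\ u\\ A\\ E\\ I\\ O\\ U\\ '
--             'a^ e^ i^ o^ u^ A^ E^ I^ O^ U^ '
--             'a0 a1 e1 i1 o1 u1 a2 e2 i2 o2 u2 c5 C5 c6 C6').split(' ')
--     vals = 'áéíóúÁÉÍÓÚàèìòùÀÈÌÒÙâêîôûAÊÎÔUåāēīōūäēïöüçÇčČ'
--     table = dict(zip(keys, vals))
--     out = []
--     i = 0
--     n = len(anyTextString)
--     while i < n:
--         two = anyTextString[i:i+2]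
--         if two in table:
--             out.append(table[two])
--             i += 2
--         elif anyTextString[i] in '{}|"':
--             i += 1
--         elif anyTextString[i] == '~':
--             out.append('–')
--             i += 1
--         else:
--             out.append(anyTextString[i])
--             i += 1
--     result = ''.join(out)
--     if result.startswith('–'):
--         result = result[1:]
--     return result
-- ===== Notes on version B (the rewrite author's own statement) =====
-- stated objective: alternative
-- what changed: Replaced A's 50 sequential whole-string str.replace passes (one per dict key) by a single left-to-right scan that looks up the two-character window in an accent table built by zipping a key string with a value string, handling the five single-character markers inline.
import Mathlib
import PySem

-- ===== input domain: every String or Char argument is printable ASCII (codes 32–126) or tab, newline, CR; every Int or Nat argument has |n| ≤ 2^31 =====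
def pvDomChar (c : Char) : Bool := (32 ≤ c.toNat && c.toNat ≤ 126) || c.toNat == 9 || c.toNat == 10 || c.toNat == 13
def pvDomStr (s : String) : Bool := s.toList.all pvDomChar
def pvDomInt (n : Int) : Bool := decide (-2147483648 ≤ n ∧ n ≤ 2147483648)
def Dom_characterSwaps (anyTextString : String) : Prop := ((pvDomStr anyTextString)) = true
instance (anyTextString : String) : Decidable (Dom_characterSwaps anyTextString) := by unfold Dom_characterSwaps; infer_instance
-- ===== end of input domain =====

set_option maxRecDepth 100000


-- B replaces A's 50 sequential whole-string str.replace passes by one left-to-right scan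
-- whose accent table is built by zipping a key string with a value string
-- (objective: alternative single-pass algorithm).

-- ===== PORT A =====
-- the dict literal of A, as an association list in insertion order
def pvDict : List (String × String) :=
  [("a/","á"), ("e/","é"), ("i/","í"), ("o/","ó"), ("u/","ú"),
   ("A/","Á"), ("E/","É"), ("I/","Í"), ("O/","Ó"), ("U/","Ú"),
   ("a\\","à"), ("e\\","è"), ("i\\","ì"), ("o\\","ò"), ("u\\","ù"),
   ("A\\","À"), ("E\\","È"), ("I\\","Ì"), ("O\\","Ò"), ("U\\","Ù"),
   ("a^","â"), ("e^","ê"), ("i^","î"), ("o^","ô"), ("u^","û"),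
   ("A^","A"), ("E^","Ê"), ("I^","Î"), ("O^","Ô"), ("U^","U"),
   ("a0","å"),
   ("a1","ā"), ("e1","ē"), ("i1","ī"), ("o1","ō"), ("u1","ū"),
   ("a2","ä"), ("e2","ē"), ("i2","ï"), ("o2","ö"), ("u2","ü"),
   ("c5","ç"), ("C5","Ç"),
   ("c6","č"), ("C6","Č"),
   ("{",""), ("}",""), ("|",""), ("\"",""),
   ("~","–")]

def characterSwaps (anyTextString : String) : String :=
  -- for key in characterDict: output = output.replace(key, characterDict[key])
  let output := pvDict.foldl (fun o p => PySem.Str.replace o p.1 p.2) anyTextString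
  -- if output: if output[0] == '–': output = output[1:]
  if PySem.Str.len output ≠ 0 then
    if PySem.Str.pyGet? output 0 = some '–' then PySem.Str.slice output (some 1) none
    else output
  else output

-- ===== PORT B =====
-- keys = '…'.split(' ')  (split(' ') cannot raise: the separator is nonempty, hence getD)
def pvKeys : List String :=
  (PySem.Str.split? "a/ e/ i/ o/ u/ A/ E/ I/ O/ U/ a\\ e\\ i\\ o\\ u\\ A\\ E\\ I\\ O\\ U\\ a^ e^ i^ o^ u^ A^ E^ I^ O^ U^ a0 a1 e1 i1 o1 u1 a2 e2 i2 o2 u2 c5 C5 c6 C6" " ").getD []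

-- vals = '…' ; table = dict(zip(keys, vals))
def pvVals : List Char := "áéíóúÁÉÍÓÚàèìòùÀÈÌÒÙâêîôûAÊÎÔUåāēīōūäēïöüçÇčČ".toList

def pvTable : List (String × Char) := pvKeys.zip pvVals

-- the while loop of Source B: the two-char window is looked up first, else single-char cases
def pvScan : List Char → List Char
  | [] => []
  | c :: t =>
    match List.lookup (String.ofList (List.take 2 (c :: t))) pvTable with
    | some v => v :: pvScan t.tail       -- matched a two-char key: i += 2
    | none =>
      if c == '{' || c == '}' || c == '|' || c == '"' then pvScan t
      else if c == '~' then '–' :: pvScan t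
      else c :: pvScan t
termination_by l => l.length
decreasing_by all_goals (simp [List.length_tail]; try omega)

def characterSwaps_alt (anyTextString : String) : String :=
  let result := String.ofList (pvScan anyTextString.toList)
  if PySem.Str.startswith result "–" then PySem.Str.slice result (some 1) none
  else result

-- ===== PRECONDITION & SPEC =====
def Spec_characterSwaps (anyTextString : String) (out : String) : Prop := out = characterSwaps_alt anyTextString
instance (anyTextString : String) (out : String) : Decidable (Spec_characterSwaps anyTextString out) := by unfold Spec_characterSwaps; infer_instance

-- ===== CLAIM (what is proved, stated in full; the proofs are below) =====
def Claim_equal_characterSwaps : Prop := ∀ (anyTextString : String), Dom_characterSwaps anyTextString → Spec_characterSwaps anyTextString (characterSwaps anyTextString)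

-- ===== LEMMAS AND PROOFS =====

-- `pvRep o p` is one str.replace pass of A; `pvFold ps s` is A's loop over the pair list ps,
-- on the List Char side.  The facts pv_go_* / pv_replace_* are basic rewriting rules for
-- PySem.Chars.replace (the prelude exports none).
theorem pv_go_fuel (old new : List Char) (h : old ≠ []) :
    ∀ f1 f2 l acc, l.length ≤ f1 → l.length ≤ f2 →
      PySem.Chars.replace.go old new f1 l acc = PySem.Chars.replace.go old new f2 l acc := by
  intro f1
  induction f1 with
  | zero =>
    intro f2 l acc h1 h2
    have : l = [] := List.eq_nil_of_length_eq_zero (Nat.le_zero.mp h1)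
    subst this
    cases f2 <;> simp [PySem.Chars.replace.go]
  | succ n ih =>
    intro f2 l acc h1 h2
    cases l with
    | nil => cases f2 <;> simp [PySem.Chars.replace.go]
    | cons c t =>
      obtain ⟨m, rfl⟩ : ∃ m, f2 = m + 1 := ⟨f2 - 1, by simp at h2; omega⟩
      simp only [PySem.Chars.replace.go]
      split
      · apply ih
        · have hol : 1 ≤ old.length := by cases old <;> simp_all
          simp [List.length_drop] at h1 ⊢; omega
        · have hol : 1 ≤ old.length := by cases old <;> simp_all
          simp [List.length_drop] at h2 ⊢; omega
      · apply ih <;> simp_all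
theorem pv_go_acc (old new : List Char) :
    ∀ fuel l acc, PySem.Chars.replace.go old new fuel l acc =
      acc.reverse ++ PySem.Chars.replace.go old new fuel l [] := by
  intro fuel
  induction fuel with
  | zero => intro l acc; simp [PySem.Chars.replace.go]
  | succ n ih =>
    intro l acc
    cases l with
    | nil => simp [PySem.Chars.replace.go]
    | cons c t =>
      simp only [PySem.Chars.replace.go]
      split
      · rw [ih _ (new.reverse ++ acc), ih _ (new.reverse ++ [])]
        simp
      · rw [ih _ (c :: acc), ih _ (c :: [])]
        simp
theorem pv_replace_eq_go (old new l : List Char) (h : old ≠ []) :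
    PySem.Chars.replace l old new = PySem.Chars.replace.go old new l.length l [] := by
  simp [PySem.Chars.replace, List.isEmpty_iff, h]

theorem pv_replace_nil (old new : List Char) (h : old ≠ []) :
    PySem.Chars.replace [] old new = [] := by
  simp [pv_replace_eq_go old new [] h, PySem.Chars.replace.go]

theorem pv_replace_cons (old new : List Char) (h : old ≠ []) (c : Char) (t : List Char)
    (hpre : old.isPrefixOf (c :: t) = false) :
    PySem.Chars.replace (c :: t) old new = c :: PySem.Chars.replace t old new := by
  rw [pv_replace_eq_go old new _ h, pv_replace_eq_go old new t h]
  simp only [List.length_cons, PySem.Chars.replace.go, hpre]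
  rw [pv_go_acc old new t.length t [c]]
  simp

theorem pv_replace_match (old new t : List Char) (h : old ≠ []) :
    PySem.Chars.replace (old ++ t) old new = new ++ PySem.Chars.replace t old new := by
  obtain ⟨o0, orest, rfl⟩ : ∃ o0 orest, old = o0 :: orest := by
    cases old with
    | nil => exact absurd rfl h
    | cons a b => exact ⟨a, b, rfl⟩
  rw [pv_replace_eq_go _ new _ h, pv_replace_eq_go _ new t h]
  have hpre : (o0 :: orest).isPrefixOf (o0 :: (orest ++ t)) = true := by
    rw [List.isPrefixOf_iff_prefix, ← List.cons_append]
    exact List.prefix_append _ _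
  simp only [List.cons_append, List.length_cons, PySem.Chars.replace.go]
  rw [if_pos hpre]
  rw [show List.drop (orest.length + 1) (o0 :: (orest ++ t)) = t by
        simp [List.drop_succ_cons]]
  rw [pv_go_acc]
  simp only [List.reverse_reverse, List.append_nil, List.append_cancel_left_eq]
  apply pv_go_fuel _ _ h
  · simp [List.length_append]
  · rfl

def pvRep (o : List Char) (p : List Char × List Char) : List Char :=
  PySem.Chars.replace o p.1 p.2

def pvFold (ps : List (List Char × List Char)) (s : List Char) : List Char :=
  ps.foldl pvRep s

def pvVH : List Char :=
  ['á','é','í','ó','ú','Á','É','Í','Ó','Ú','à','è','ì','ò','ù','À','È','Ì','Ò','Ù',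
   'â','ê','î','ô','û','A','Ê','Î','Ô','U','å','ā','ē','ī','ō','ū','ä','ï','ö','ü',
   'ç','Ç','č','Č']

theorem pvFold_nil : ∀ ps, (∀ p ∈ ps, p.1 ≠ []) → pvFold ps [] = [] := by
  intro ps
  induction ps with
  | nil => intro _; rfl
  | cons p r ih =>
    intro h
    show pvFold r (pvRep [] p) = []
    rw [pvRep, pv_replace_nil _ _ (h p (List.mem_cons_self))]
    exact ih (fun q hq => h q (List.mem_cons_of_mem _ hq))

theorem pvFold_cons (c : Char) :
    ∀ ps, (∀ p ∈ ps, p.1 ≠ [] ∧ p.1.head? ≠ some c) →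
    ∀ w, pvFold ps (c :: w) = c :: pvFold ps w := by
  intro ps
  induction ps with
  | nil => intro _ w; rfl
  | cons p r ih =>
    intro h w
    obtain ⟨hne, hhd⟩ := h p (List.mem_cons_self)
    have hpre : p.1.isPrefixOf (c :: w) = false := by
      cases hp : p.1 with
      | nil => exact absurd hp hne
      | cons k0 kr =>
        have : k0 ≠ c := by rw [hp] at hhd; simpa using hhd
        simp [List.isPrefixOf, this]
    show pvFold r (pvRep (c :: w) p) = c :: pvFold r (pvRep w p)
    rw [pvRep, pv_replace_cons _ _ hne c w hpre]
    exact ih (fun q hq => h q (List.mem_cons_of_mem _ hq)) _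

theorem pv_run2 (c d : Char) (v : List Char) :
    ∀ ps, (([c,d],v) ∈ ps) →
    (∀ p ∈ ps, ∃ k0 k1, p.1 = [k0,k1] ∧ k0 ≠ d) →
    List.Pairwise (fun p q => p.1 ≠ q.1 ∧ q.1.head? ≠ p.2.head?) ps →
    (v = [] ∨ ∃ vc, v = [vc]) →
    ∀ w, pvFold ps (c :: d :: w) = v ++ pvFold ps w := by
  intro ps
  induction ps with
  | nil => intro hmem; exact absurd hmem (List.not_mem_nil)
  | cons p r ih =>
    intro hmem h2 hpw hv w
    obtain ⟨hfirst, hr⟩ := List.pairwise_cons.mp hpw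
    rcases List.mem_cons.mp hmem with heq | hmemr
    · -- p is the matching pair
      subst heq
      show pvFold r (pvRep (c :: d :: w) ([c,d],v)) = v ++ pvFold r (pvRep w ([c,d],v))
      rw [pvRep, show (c :: d :: w) = [c,d] ++ w from rfl,
          pv_replace_match [c,d] v w (by simp)]
      rcases hv with rfl | ⟨vc, rfl⟩
      · rfl
      · exact pvFold_cons vc r
          (fun q hq => ⟨by obtain ⟨k0,k1,hk,_⟩ := h2 q (List.mem_cons_of_mem _ hq); simp [hk],
                        by simpa using (hfirst q hq).2⟩) _
    · -- p comes before the match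
      have hne_cd : p.1 ≠ [c,d] := (hfirst ([c,d],v) hmemr).1
      obtain ⟨k0, k1, hk, hk0d⟩ := h2 p (List.mem_cons_self)
      have hne : p.1 ≠ [] := by rw [hk]; simp
      have hpre1 : p.1.isPrefixOf (c :: d :: w) = false := by
        rw [hk]
        by_cases hc : k0 = c
        · have hk1 : k1 ≠ d := fun hd => hne_cd (by rw [hk, hc, hd])
          simp [List.isPrefixOf, hk1]
        · simp [List.isPrefixOf, hc]
      have hpre2 : ∀ u : List Char, p.1.isPrefixOf (d :: u) = false := by
        intro u; rw [hk]; simp [List.isPrefixOf, hk0d]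
      show pvFold r (pvRep (c :: d :: w) p) = v ++ pvFold r (pvRep w p)
      rw [pvRep, pv_replace_cons _ _ hne c _ hpre1, pv_replace_cons _ _ hne d _ (hpre2 w)]
      exact ih hmemr (fun q hq => h2 q (List.mem_cons_of_mem _ hq)) hr hv _

theorem pv_run1 (c : Char) (v : List Char) :
    ∀ ps, (([c],v) ∈ ps) →
    (∀ p ∈ ps, ∃ k0, p.1 = [k0]) →
    List.Pairwise (fun p q => p.1 ≠ q.1 ∧ q.1.head? ≠ p.2.head?) ps →
    (v = [] ∨ ∃ vc, v = [vc]) →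
    ∀ w, pvFold ps (c :: w) = v ++ pvFold ps w := by
  intro ps
  induction ps with
  | nil => intro hmem; exact absurd hmem (List.not_mem_nil)
  | cons p r ih =>
    intro hmem h1 hpw hv w
    obtain ⟨hfirst, hr⟩ := List.pairwise_cons.mp hpw
    rcases List.mem_cons.mp hmem with heq | hmemr
    · subst heq
      show pvFold r (pvRep (c :: w) ([c],v)) = v ++ pvFold r (pvRep w ([c],v))
      rw [pvRep, show (c :: w) = [c] ++ w from rfl, pv_replace_match [c] v w (by simp)]
      rcases hv with rfl | ⟨vc, rfl⟩
      · rfl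
      · exact pvFold_cons vc r
          (fun q hq => ⟨by obtain ⟨k0,hk⟩ := h1 q (List.mem_cons_of_mem _ hq); simp [hk],
                        by simpa using (hfirst q hq).2⟩) _
    · have hne_c : p.1 ≠ [c] := (hfirst ([c],v) hmemr).1
      obtain ⟨k0, hk⟩ := h1 p (List.mem_cons_self)
      have hk0 : k0 ≠ c := fun hq => hne_c (by rw [hk, hq])
      have hne : p.1 ≠ [] := by rw [hk]; simp
      have hpre : p.1.isPrefixOf (c :: w) = false := by rw [hk]; simp [List.isPrefixOf, hk0]
      show pvFold r (pvRep (c :: w) p) = v ++ pvFold r (pvRep w p)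
      rw [pvRep, pv_replace_cons _ _ hne c _ hpre]
      exact ih hmemr (fun q hq => h1 q (List.mem_cons_of_mem _ hq)) hr hv _

theorem pv_p1cons (c d : Char) :
    ∀ ps, (∀ p ∈ ps, (∃ k0 k1, p.1 = [k0,k1] ∧ k1 ∉ pvVH) ∧ p.1 ≠ [c,d] ∧
                     (∃ vc, p.2 = [vc] ∧ vc ∈ pvVH)) →
    ∀ s, (∀ x, s.head? = some x → x = d ∨ x ∈ pvVH) →
    pvFold ps (c :: s) = c :: pvFold ps s ∧
      (∀ x, (pvFold ps s).head? = some x → x = d ∨ x ∈ pvVH) := by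
  intro ps
  induction ps with
  | nil => intro _ s hs; exact ⟨rfl, hs⟩
  | cons p r ih =>
    intro h s hs
    obtain ⟨⟨k0, k1, hk, hk1vh⟩, hncd, vc, hv, hvcvh⟩ := h p (List.mem_cons_self)
    have hne : p.1 ≠ [] := by rw [hk]; simp
    have hpre : p.1.isPrefixOf (c :: s) = false := by
      rw [hk]
      cases hs' : s with
      | nil => simp [List.isPrefixOf]
      | cons x w =>
        by_cases hc : k0 = c
        · by_cases hx : k1 = x
          · exfalso
            rcases hs x (by rw [hs']; rfl) with rfl | hxvh
            · exact hncd (by rw [hk, hc, hx])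
            · exact hk1vh (hx ▸ hxvh)
          · simp [List.isPrefixOf, hx]
        · simp [List.isPrefixOf, hc]
    have hsp : ∀ x, (pvRep s p).head? = some x → x = d ∨ x ∈ pvVH := by
      cases s with
      | nil =>
        rw [pvRep, pv_replace_nil _ _ hne]; intro x hx; simp at hx
      | cons y w =>
        by_cases hp2 : p.1.isPrefixOf (y :: w) = true
        · obtain ⟨t2, ht2⟩ := (List.isPrefixOf_iff_prefix.mp hp2)
          rw [pvRep, ← ht2, pv_replace_match _ _ _ hne, hv]
          intro x hx; simp at hx
          exact Or.inr (hx ▸ hvcvh)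
        · rw [pvRep, pv_replace_cons _ _ hne y w (Bool.eq_false_iff.mpr hp2)]
          intro x hx
          simp only [List.head?_cons, Option.some.injEq] at hx
          exact hx ▸ hs y rfl
    have htail := fun q hq => h q (List.mem_cons_of_mem _ hq)
    have hihr := ih htail (pvRep s p) hsp
    refine ⟨?_, hihr.2⟩
    show pvFold r (pvRep (c :: s) p) = c :: pvFold r (pvRep s p)
    rw [pvRep, pv_replace_cons _ _ hne c s hpre]
    exact hihr.1

theorem pv_lookup_none {ν : Type} (k : List Char) :
    ∀ ps : List (String × ν), (∀ p ∈ ps, p.1.toList ≠ k) →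
    List.lookup (String.ofList k) ps = none := by
  intro ps
  induction ps with
  | nil => intro _; rfl
  | cons p r ih =>
    intro h
    have hne : (String.ofList k == p.1) = false := by
      apply beq_false_of_ne
      intro he
      exact h p (List.mem_cons_self) (by rw [← he]; simp)
    obtain ⟨p1, p2⟩ := p
    simp only [List.lookup, hne]
    exact ih (fun q hq => h q (List.mem_cons_of_mem _ hq))

theorem pv_lookup_first {ν : Type} :
    ∀ ps : List (String × ν), ∀ kS : String, ∀ vS : ν, (kS, vS) ∈ ps →
    List.Pairwise (fun p q : String × ν => p.1 ≠ q.1) ps →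
    List.lookup kS ps = some vS := by
  intro ps
  induction ps with
  | nil => intro kS vS hmem _; exact absurd hmem (List.not_mem_nil)
  | cons p r ih =>
    intro kS vS hmem hpw
    obtain ⟨hfirst, hr⟩ := List.pairwise_cons.mp hpw
    rcases List.mem_cons.mp hmem with heq | hmemr
    · rw [← heq]; simp [List.lookup]
    · have : p.1 ≠ kS := fun he => (hfirst _ hmemr) (by rw [he])
      have hne : (kS == p.1) = false := beq_false_of_ne (fun he => this he.symm)
      obtain ⟨p1, p2⟩ := p
      simp only [List.lookup, hne]
      exact ih kS vS hmemr hr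

-- the value of pvTable, as a literal (proved equal once, then used everywhere below)
def pvAcc : List (String × Char) :=
  [("a/",'á'), ("e/",'é'), ("i/",'í'), ("o/",'ó'), ("u/",'ú'),
   ("A/",'Á'), ("E/",'É'), ("I/",'Í'), ("O/",'Ó'), ("U/",'Ú'),
   ("a\\",'à'), ("e\\",'è'), ("i\\",'ì'), ("o\\",'ò'), ("u\\",'ù'),
   ("A\\",'À'), ("E\\",'È'), ("I\\",'Ì'), ("O\\",'Ò'), ("U\\",'Ù'),
   ("a^",'â'), ("e^",'ê'), ("i^",'î'), ("o^",'ô'), ("u^",'û'),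
   ("A^",'A'), ("E^",'Ê'), ("I^",'Î'), ("O^",'Ô'), ("U^",'U'),
   ("a0",'å'),
   ("a1",'ā'), ("e1",'ē'), ("i1",'ī'), ("o1",'ō'), ("u1",'ū'),
   ("a2",'ä'), ("e2",'ē'), ("i2",'ï'), ("o2",'ö'), ("u2",'ü'),
   ("c5",'ç'), ("C5",'Ç'),
   ("c6",'č'), ("C6",'Č')]

set_option maxHeartbeats 4000000 in
theorem pvTable_eq : pvTable = pvAcc := by decide

-- char-level images of the two tables: pvAP are the 45 two-char accent pairs (= pvAcc),
-- pvSP the 5 single-char pairs; pvLP is all of A's dict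
def pvLP : List (List Char × List Char) := pvDict.map (fun p => (p.1.toList, p.2.toList))
def pvAP : List (List Char × List Char) := pvAcc.map (fun p => (p.1.toList, [p.2]))
def pvSP : List (List Char × List Char) :=
  [(['{'],[]), (['}'],[]), (['|'],[]), (['"'],[]), (['~'],['–'])]

-- decided structural facts about the literal tables
theorem pvF_split : pvLP = pvAP ++ pvSP := by decide

theorem pvF_shape : ∀ p ∈ pvAP, (∃ k0 k1, p.1 = [k0,k1] ∧ k1 ∉ pvVH) ∧
    (∃ vc, p.2 = [vc] ∧ vc ∈ pvVH) := by
  intro p hp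
  fin_cases hp <;> exact ⟨⟨_, _, rfl, by decide⟩, _, rfl, by decide⟩

theorem pvF_pw2 : List.Pairwise (fun p q => p.1 ≠ q.1 ∧ q.1.head? ≠ p.2.head?) pvAP := by decide

theorem pvF_sec : ∀ q ∈ pvAP, ∀ p ∈ pvAP, p.1.head? ≠ q.1.getLast? := by decide

theorem pvF_apsp : ∀ p ∈ pvAP, ∀ q ∈ pvSP, q.1.head? ≠ p.2.head? := by decide

theorem pvF_sppw : List.Pairwise (fun p q => p.1 ≠ q.1 ∧ q.1.head? ≠ p.2.head?) pvSP := by decide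

theorem pvF_spshape : ∀ p ∈ pvSP, ∃ k0, p.1 = [k0] := by
  intro p hp; fin_cases hp <;> exact ⟨_, rfl⟩

theorem pvF_strpw : List.Pairwise (fun p q : String × Char => p.1 ≠ q.1) pvAcc := by decide

theorem pvF_lpne : ∀ p ∈ pvLP, p.1 ≠ [] := by decide

theorem pv_head_ne {l : List Char} {c : Char} {m : List Char}
    (h : l.head? ≠ some c) : l ≠ c :: m := fun he => h (by rw [he]; rfl)

-- the main induction: A's 50-pass loop equals B's single scan
set_option maxHeartbeats 1000000 in
theorem pv_main : ∀ n (l : List Char), l.length ≤ n → pvFold pvLP l = pvScan l := by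
  intro n
  induction n with
  | zero =>
    intro l hl
    have hnil : l = [] := List.eq_nil_of_length_eq_zero (Nat.le_zero.mp hl)
    subst hnil
    rw [pvFold_nil pvLP pvF_lpne, pvScan]
  | succ n ih =>
    intro l hl
    cases l with
    | nil => rw [pvFold_nil pvLP pvF_lpne, pvScan]
    | cons c t =>
      have hlt : t.length ≤ n := by simp at hl; omega
      have hsplit : ∀ s, pvFold pvLP s = pvFold pvSP (pvFold pvAP s) := by
        intro s; rw [pvF_split]; simp [pvFold, List.foldl_append]
      by_cases hsing : c = '{' ∨ c = '}' ∨ c = '|' ∨ c = '"' ∨ c = '~'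
      · -- case II: a single-char key fires
        have hlk : List.lookup (String.ofList (List.take 2 (c :: t))) pvAcc = none := by
          rw [show List.take 2 (c :: t) = c :: List.take 1 t from rfl]
          refine pv_lookup_none _ pvAcc (fun p hp => pv_head_ne ?_)
          rcases hsing with rfl|rfl|rfl|rfl|rfl <;> revert hp <;> revert p <;> decide
        have hap : ∀ p ∈ pvAP, p.1 ≠ [] ∧ p.1.head? ≠ some c := by
          rcases hsing with rfl|rfl|rfl|rfl|rfl <;> decide
        rcases hsing with rfl|rfl|rfl|rfl|rfl
        · rw [hsplit, pvFold_cons _ pvAP hap,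
              pv_run1 _ [] pvSP (by decide) pvF_spshape pvF_sppw (Or.inl rfl),
              ← hsplit, ih t hlt, pvScan, pvTable_eq, hlk]
          rfl
        · rw [hsplit, pvFold_cons _ pvAP hap,
              pv_run1 _ [] pvSP (by decide) pvF_spshape pvF_sppw (Or.inl rfl),
              ← hsplit, ih t hlt, pvScan, pvTable_eq, hlk]
          rfl
        · rw [hsplit, pvFold_cons _ pvAP hap,
              pv_run1 _ [] pvSP (by decide) pvF_spshape pvF_sppw (Or.inl rfl),
              ← hsplit, ih t hlt, pvScan, pvTable_eq, hlk]
          rfl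
        · rw [hsplit, pvFold_cons _ pvAP hap,
              pv_run1 _ [] pvSP (by decide) pvF_spshape pvF_sppw (Or.inl rfl),
              ← hsplit, ih t hlt, pvScan, pvTable_eq, hlk]
          rfl
        · rw [hsplit, pvFold_cons _ pvAP hap,
              pv_run1 _ ['–'] pvSP (by decide) pvF_spshape pvF_sppw (Or.inr ⟨'–', rfl⟩),
              ← hsplit, ih t hlt, pvScan, pvTable_eq, hlk]
          rfl
      · simp only [not_or] at hsing
        obtain ⟨hs1, hs2, hs3, hs4, hs5⟩ := hsing
        have hspc : ∀ q ∈ pvSP, q.1 ≠ [] ∧ q.1.head? ≠ some c := by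
          intro q hq
          obtain ⟨k0, hk⟩ := pvF_spshape q hq
          refine ⟨by rw [hk]; simp, ?_⟩
          rw [hk]
          simp only [List.head?_cons, ne_eq, Option.some.injEq]
          intro hkc
          have hd : q.1.head? = some k0 := by rw [hk]; rfl
          have h5 := (by decide : ∀ q ∈ pvSP, q.1.head? = some '{' ∨ q.1.head? = some '}' ∨
            q.1.head? = some '|' ∨ q.1.head? = some '"' ∨ q.1.head? = some '~') q hq
          subst hkc
          rcases h5 with h|h|h|h|h <;> rw [hd] at h <;> simp at h <;> simp_all
        have hbool1 : (c == '{' || c == '}' || c == '|' || c == '"') = false := by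
          simp only [Bool.or_eq_false_iff, beq_eq_false_iff_ne, ne_eq]
          exact ⟨⟨⟨hs1, hs2⟩, hs3⟩, hs4⟩
        have hbool2 : (c == '~') = false := by
          simp only [beq_eq_false_iff_ne, ne_eq]; exact hs5
        cases t with
        | nil =>
          -- single character, no key can fire
          have hap2 : ∀ p ∈ pvAP, (∃ k0 k1, p.1 = [k0,k1] ∧ k1 ∉ pvVH) ∧ p.1 ≠ [c,c] ∧
              (∃ vc, p.2 = [vc] ∧ vc ∈ pvVH) := by
            intro p hp
            obtain ⟨⟨k0, k1, hk, hkvh⟩, hval⟩ := pvF_shape p hp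
            refine ⟨⟨k0, k1, hk, hkvh⟩, ?_, hval⟩
            intro he
            have hsec := pvF_sec p hp p hp
            rw [he] at hsec
            exact hsec rfl
          have h1 := (pv_p1cons c c pvAP hap2 [] (by intro x hx; simp at hx)).1
          have hapnil : pvFold pvAP [] = [] := pvFold_nil pvAP (fun p hp => by
            obtain ⟨⟨k0, k1, hk, _⟩, _⟩ := pvF_shape p hp; rw [hk]; simp)
          have hlk : List.lookup (String.ofList (List.take 2 [c])) pvAcc = none := by
            rw [show List.take 2 [c] = [c] from rfl]
            refine pv_lookup_none _ pvAcc (fun p hp he => ?_)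
            have hl2 := (by decide : ∀ p ∈ pvAcc, p.1.toList.length = 2) p hp
            rw [he] at hl2; simp at hl2
          rw [hsplit, h1, hapnil, pvFold_cons c pvSP hspc, pvFold_nil pvSP
                (fun q hq => by obtain ⟨k0, hk⟩ := pvF_spshape q hq; rw [hk]; simp),
              pvScan, pvTable_eq, hlk]
          simp only [hbool1, hbool2, Bool.false_eq_true, if_false, pvScan]
        | cons d u =>
          rcases Classical.em ([c,d] ∈ pvAP.map Prod.fst) with hkey | hkey
          · -- case III: the two-char key (c,d) fires
            obtain ⟨p0, hp0, hp0eq⟩ := List.mem_map.mp hkey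
            obtain ⟨⟨k0, k1, hk, _⟩, vc, hvv, hvcvh⟩ := pvF_shape p0 hp0
            have hmemp : ([c,d], p0.2) ∈ pvAP := by rw [← hp0eq]; exact hp0
            have hrun := pv_run2 c d p0.2 pvAP hmemp
              (by intro p hp
                  obtain ⟨⟨j0, j1, hj, _⟩, _⟩ := pvF_shape p hp
                  refine ⟨j0, j1, hj, ?_⟩
                  have hsec := pvF_sec p0 hp0 p hp
                  rw [hj, hp0eq] at hsec
                  simpa using hsec)
              pvF_pw2 (Or.inr ⟨vc, hvv⟩) u
            have hspcv : ∀ q ∈ pvSP, q.1 ≠ [] ∧ q.1.head? ≠ some vc := by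
              intro q hq
              obtain ⟨k0', hk'⟩ := pvF_spshape q hq
              refine ⟨by rw [hk']; simp, ?_⟩
              have happ := pvF_apsp p0 hp0 q hq
              rw [hvv] at happ
              simpa using happ
            have hu : u.length ≤ n := by simp at hl; omega
            -- B side: the lookup in pvAcc succeeds with the same value
            have hp0' : p0 ∈ pvAcc.map (fun p => (p.1.toList, [p.2])) := hp0
            obtain ⟨q0, hq0, hq0eq⟩ := List.mem_map.mp hp0'
            have hq1 : q0.1.toList = [c,d] := by
              have := congrArg Prod.fst hq0eq; simp at this; rw [this, hp0eq]
            have hq2 : [q0.2] = p0.2 := by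
              have := congrArg Prod.snd hq0eq; simpa using this
            have hlk2 : List.lookup (String.ofList (List.take 2 (c::d::u))) pvAcc
                = some q0.2 := by
              rw [show List.take 2 (c::d::u) = [c,d] from rfl, ← hq1, String.ofList_toList]
              exact pv_lookup_first pvAcc q0.1 q0.2 (by simpa using hq0) pvF_strpw
            have hvcq : vc = q0.2 := by
              have := hq2.trans hvv; simpa using this.symm
            rw [hsplit, hrun, hvv, List.singleton_append,
                pvFold_cons vc pvSP hspcv, ← hsplit, ih u hu, pvScan, pvTable_eq, hlk2]
            simp only [hvcq, List.tail_cons]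
          · -- case IV: no key fires at c
            have hap2 : ∀ p ∈ pvAP, (∃ k0 k1, p.1 = [k0,k1] ∧ k1 ∉ pvVH) ∧ p.1 ≠ [c,d] ∧
                (∃ vc, p.2 = [vc] ∧ vc ∈ pvVH) := by
              intro p hp
              obtain ⟨hsh, hval⟩ := pvF_shape p hp
              exact ⟨hsh, fun he => hkey (he ▸ List.mem_map_of_mem hp), hval⟩
            have h1 := (pv_p1cons c d pvAP hap2 (d::u)
              (by intro x hx; simp only [List.head?_cons, Option.some.injEq] at hx
                  exact Or.inl hx.symm)).1
            have hlkn : List.lookup (String.ofList (List.take 2 (c::d::u))) pvAcc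
                = none := by
              rw [show List.take 2 (c::d::u) = [c,d] from rfl]
              refine pv_lookup_none _ pvAcc (fun p hp he => ?_)
              have hmem2 : (p.1.toList, [p.2]) ∈ pvAP := List.mem_map_of_mem hp
              exact hkey (he ▸ List.mem_map_of_mem hmem2)
            rw [hsplit, h1, pvFold_cons c pvSP hspc, ← hsplit, pvScan, pvTable_eq, hlkn]
            simp only [hbool1, hbool2, Bool.false_eq_true, if_false]
            rw [ih (d::u) (by simp at hl ⊢; omega)]

-- bridging the String-level fold of port A to pvFold
theorem pv_foldS :
    ∀ (ps : List (String × String)) (s : String),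
      (ps.foldl (fun o p => PySem.Str.replace o p.1 p.2) s).toList =
        pvFold (ps.map (fun p => (p.1.toList, p.2.toList))) s.toList := by
  intro ps
  induction ps with
  | nil => intro s; rfl
  | cons p r ih =>
    intro s
    simp only [List.foldl_cons, List.map_cons]
    rw [ih (PySem.Str.replace s p.1 p.2)]
    show pvFold _ _ = pvFold _ (pvRep s.toList (p.1.toList, p.2.toList))
    rw [pvRep]
    simp only [PySem.Str.toList_replace]

-- ===== VERDICT (by name: the statement is the Claim_ definition above) =====
theorem characterSwaps_spec : Claim_equal_characterSwaps := by
  unfold Claim_equal_characterSwaps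
  intro s _
  unfold Spec_characterSwaps characterSwaps characterSwaps_alt
  have hfold : (pvDict.foldl (fun o p => PySem.Str.replace o p.1 p.2) s).toList
      = pvScan s.toList := by
    rw [pv_foldS pvDict s,
        show pvDict.map (fun p => (p.1.toList, p.2.toList)) = pvLP from rfl]
    exact pv_main s.toList.length _ le_rfl
  have hO : pvDict.foldl (fun o p => PySem.Str.replace o p.1 p.2) s
      = String.ofList (pvScan s.toList) := by
    rw [← String.ofList_toList
          (s := pvDict.foldl (fun o p => PySem.Str.replace o p.1 p.2) s), hfold]
  rw [hO]
  cases hr : pvScan s.toList with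
  | nil =>
    rw [if_neg, if_neg]
    · rw [show PySem.Str.startswith (String.ofList []) "–" = false from by decide]
      simp
    · rw [show PySem.Str.len (String.ofList []) = 0 from by decide]
      simp
  | cons x r' =>
    have hlen : PySem.Str.len (String.ofList (x::r')) ≠ 0 := by
      simp [PySem.Str.len]
      omega
    rw [if_pos hlen]
    have hget : PySem.Str.pyGet? (String.ofList (x::r')) 0 = some x := by
      simp [PySem.Str.pyGet?, PySem.Chars.pyGet?]
    have hsw : PySem.Str.startswith (String.ofList (x::r')) "–" = (x == '–') := by
      rw [PySem.Str.startswith_eq, show ("–" : String).toList = ['–'] from by decide]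
      simp [PySem.Chars.startswith, List.isPrefixOf, eq_comm]
    by_cases hx : x = '–'
    · subst hx
      rw [if_pos (by rw [hget]), if_pos (by rw [hsw]; simp)]
    · rw [if_neg (by rw [hget]; simpa using hx), if_neg (by rw [hsw]; simpa using hx)]
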